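-- pv_equiv track=rewrite | github.com/Rhettoric74/GridironFootball | scripts/dice_game.py | check_for_triples
-- ===== SOURCE A (Python) =====
-- def check_for_triples(rolls):
--         """returns a number if the given list of rolls contains "triples".
--         Returns negative 1 if there are no triples in the list."""
--         counts = {}
--         for roll in rolls:
--             if roll not in counts:
--                 counts[roll] = 1
--             else:
--                 counts[roll] += 1
--         for number, count in counts.items():
--             if count >= 3:
--                 return number
--         return -1
-- ===== SOURCE B (Python) =====
-- def check_for_triples(rolls):
--     """returns a number if the given list of rolls contains "triples".
--     Returns negative 1 if there are no triples in the list."""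
--     s = sorted(rolls)
--     triples = set()
--     for i in range(len(s) - 2):
--         if s[i] == s[i + 2]:
--             triples.add(s[i])
--     for roll in rolls:
--         if roll in triples:
--             return roll
--     return -1
-- ===== Notes on version B (the rewrite author's own statement) =====
-- stated objective: alternative
-- what changed: Replaced the hash-count dictionary and its items() pass by a sort-based algorithm: sort a copy, detect values occurring >=3 times as runs where s[i]==s[i+2] in the sorted copy, then return the first roll of the original list belonging to that set; dict insertion order equals first-appearance order, so results coincide.
import Mathlib
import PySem

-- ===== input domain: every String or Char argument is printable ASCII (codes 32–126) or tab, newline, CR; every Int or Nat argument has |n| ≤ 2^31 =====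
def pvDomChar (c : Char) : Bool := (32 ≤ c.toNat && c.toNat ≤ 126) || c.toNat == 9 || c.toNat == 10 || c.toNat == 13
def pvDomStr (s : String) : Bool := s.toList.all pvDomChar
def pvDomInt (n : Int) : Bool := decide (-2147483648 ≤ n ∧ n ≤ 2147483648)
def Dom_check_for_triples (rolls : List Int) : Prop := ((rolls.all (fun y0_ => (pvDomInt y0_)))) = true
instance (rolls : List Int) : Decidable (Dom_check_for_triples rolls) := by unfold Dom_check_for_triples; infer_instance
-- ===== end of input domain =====

-- B replaces A's count-dictionary and items() pass by a sort-based algorithm: detect values occurring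
-- three or more times as runs s[i] == s[i+2] in a sorted copy, then return the first original roll in that set.

-- ===== PORT A =====
-- second loop of A: first (number, count) item with count >= 3, else -1
def pvScanItems (items : List (Int × Int)) : Int :=
  match items with
  | [] => -1
  | (number, count) :: rest => if 3 ≤ count then number else pvScanItems rest

def check_for_triples (rolls : List Int) : Int :=
  let counts := rolls.foldl
    (fun d roll => if d.contains roll = false then d.insert roll 1 else d.modify roll 0 (· + 1))
    PySem.Dict.empty
  pvScanItems counts.items

-- ===== PORT B =====
-- body of B's first loop: if s[i] == s[i + 2]: triples.add(s[i])
def pvRunStep (s : List Int) (t : PySem.Set Int) (i : Int) : PySem.Set Int :=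
  match PySem.List.pyGet? s i, PySem.List.pyGet? s (i + 2) with
  | some a, some b => if a = b then PySem.Set.add t a else t
  | _, _ => t   -- unreachable: i is drawn from range(len(s) - 2)

-- B's first loop: for i in range(len(s) - 2): ...
def pvRunTriples (s : List Int) : PySem.Set Int :=
  (PySem.List.pyRange 0 ((s.length : Int) - 2)).foldl (pvRunStep s) PySem.Set.empty

-- B's second loop: first roll belonging to the set, else -1
def pvScanSet (triples : PySem.Set Int) (rest : List Int) : Int :=
  match rest with
  | [] => -1
  | r :: rest' => if PySem.Set.contains triples r then r else pvScanSet triples rest'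

def check_for_triples_alt (rolls : List Int) : Int :=
  let s := PySem.List.sorted rolls (fun x => x)
  pvScanSet (pvRunTriples s) rolls

-- ===== PRECONDITION & SPEC =====
def Spec_check_for_triples (rolls : List Int) (out : Int) : Prop := out = check_for_triples_alt rolls
instance (rolls : List Int) (out : Int) : Decidable (Spec_check_for_triples rolls out) := by unfold Spec_check_for_triples; infer_instance

-- ===== CLAIM (what is proved, stated in full; the proofs are below) =====
def Claim_equal_check_for_triples : Prop := ∀ (rolls : List Int), Dom_check_for_triples rolls → Spec_check_for_triples rolls (check_for_triples rolls)

-- ===== LEMMAS AND PROOFS =====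

-- A's counting loop is exactly Counter(rolls)
theorem pvFold_eq_counter (rolls : List Int) :
    rolls.foldl
      (fun d roll => if d.contains roll = false then d.insert roll 1 else d.modify roll 0 (· + 1))
      PySem.Dict.empty = PySem.Dict.counter rolls := by
  rw [PySem.Dict.counter_eq_foldl]
  congr 1
  funext d roll
  by_cases h : d.contains roll = false
  · rw [PySem.Dict.modify, PySem.Dict.getD_of_not_contains d 0 h]
    norm_num
  · simp [h, PySem.Dict.modify]

-- generic first-hit scan over a key list
def pvGo (p : Int → Bool) (l : List Int) : Int :=
  match l with
  | [] => -1
  | x :: t => if p x then x else pvGo p t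

theorem pvGo_filter (p : Int → Bool) (x : Int) (hx : p x = false) (l : List Int) :
    pvGo p (l.filter (fun y => y != x)) = pvGo p l := by
  induction l with
  | nil => rfl
  | cons a t ih =>
    by_cases hax : a = x
    · subst hax; simp [pvGo, List.filter, hx, ih]
    · simp [pvGo, show (a != x) = true by simp [bne, hax], ih]

theorem pvGo_ofList (p : Int → Bool) (l : List Int) :
    pvGo p (PySem.Set.ofList l) = pvGo p l := by
  induction l with
  | nil => rfl
  | cons x t ih =>
    have h : PySem.Set.ofList (x :: t) = x :: (PySem.Set.ofList t).filter (fun y => y != x) := by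
      have h1 : PySem.Set.ofList (x :: t) = PySem.Set.update (PySem.Set.ofList [x]) t := by
        have := PySem.Set.ofList_append (α := Int) [x] t
        simpa using this
      rw [h1, PySem.Set.update_eq_append_filter]
      simp only [PySem.Set.ofList, List.foldl_cons, List.foldl_nil]
      have hx1 : PySem.Set.empty.add x = [x] := by rfl
      rw [hx1]
      show x :: List.filter _ _ = x :: List.filter _ _
      congr 1
      refine List.filter_congr (fun y _ => ?_)
      show (!PySem.Set.contains [x] y) = (y != x)
      rw [show PySem.Set.contains [x] y = (y == x) by
        by_cases hyx : y = x <;> simp [PySem.Set.contains, hyx]]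
      rfl
    rw [h]
    by_cases hp : p x
    · simp [pvGo, hp]
    · have hpx : p x = false := by simpa using hp
      simp [pvGo, hpx, pvGo_filter p x hpx, ih]

theorem pvScanItems_map (rolls : List Int) (l : List Int) :
    pvScanItems (l.map (fun k => (k, (rolls.count k : Int)))) =
      pvGo (fun k => decide (3 ≤ (rolls.count k : Int))) l := by
  induction l with
  | nil => rfl
  | cons x t ih => simp [pvScanItems, pvGo, ih]

theorem pvScanSet_eq_go (t : PySem.Set Int) (rest : List Int) :
    pvScanSet t rest = pvGo (fun k => PySem.Set.contains t k) rest := by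
  induction rest with
  | nil => rfl
  | cons x l ih => simp [pvScanSet, pvGo, ih]

-- membership in the fold of pvRunStep
theorem mem_pvFoldHit (s : List Int) (l : List Int) (t : PySem.Set Int) (x : Int) :
    x ∈ l.foldl (pvRunStep s) t ↔
      x ∈ t ∨ ∃ i ∈ l, PySem.List.pyGet? s i = some x ∧ PySem.List.pyGet? s (i + 2) = some x := by
  induction l generalizing t with
  | nil => simp
  | cons i l ih =>
    have hstep : x ∈ pvRunStep s t i ↔
        x ∈ t ∨ (PySem.List.pyGet? s i = some x ∧ PySem.List.pyGet? s (i + 2) = some x) := by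
      unfold pvRunStep
      rcases h1 : PySem.List.pyGet? s i with _ | a <;>
        rcases h2 : PySem.List.pyGet? s (i + 2) with _ | b <;> simp
      by_cases hab : a = b
      · subst hab
        simp [PySem.Set.mem_add, eq_comm]
      · simp [hab]
        intro hax hbx
        exact absurd (hax.trans hbx.symm) hab
    rw [List.foldl_cons, ih, hstep]
    constructor
    · rintro ((h | h12) | ⟨j, hj, hjs⟩)
      · exact Or.inl h
      · exact Or.inr ⟨i, List.mem_cons_self, h12⟩
      · exact Or.inr ⟨j, List.mem_cons_of_mem _ hj, hjs⟩
    · rintro (h | ⟨j, hj, hjs⟩)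
      · exact Or.inl (Or.inl h)
      · rcases List.mem_cons.mp hj with rfl | hj'
        · exact Or.inl (Or.inr hjs)
        · exact Or.inr ⟨j, hj', hjs⟩

theorem mem_pvRunTriples (s : List Int) (x : Int) :
    x ∈ pvRunTriples s ↔
      ∃ n : Nat, ∃ _ : n + 2 < s.length, s[n]'(by omega) = x ∧ s[n + 2]'(by omega) = x := by
  unfold pvRunTriples
  rw [mem_pvFoldHit]
  constructor
  · rintro (h | ⟨i, hi, h1, h2⟩)
    · cases h
    · have hr := PySem.List.mem_pyRange_one.mp hi
      obtain ⟨n, rfl⟩ : ∃ n : Nat, (n : Int) = i := ⟨i.toNat, Int.toNat_of_nonneg hr.1⟩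
      have hn : n + 2 < s.length := by
        have := hr.2
        omega
      rw [PySem.List.pyGet?_natCast, List.getElem?_eq_getElem (by omega)] at h1
      rw [show ((n : Int) + 2) = ((n + 2 : Nat) : Int) by push_cast; ring,
        PySem.List.pyGet?_natCast, List.getElem?_eq_getElem (by omega)] at h2
      exact ⟨n, hn, Option.some_injective _ h1, Option.some_injective _ h2⟩
  · rintro ⟨n, hn, h1, h2⟩
    refine Or.inr ⟨(n : Int), PySem.List.mem_pyRange_one.mpr ⟨by positivity, by omega⟩, ?_, ?_⟩
    · rw [PySem.List.pyGet?_natCast, List.getElem?_eq_getElem (by omega), h1]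
    · rw [show ((n : Int) + 2) = ((n + 2 : Nat) : Int) by push_cast; ring,
        PySem.List.pyGet?_natCast, List.getElem?_eq_getElem (by omega), h2]

theorem pv_sorted_mono (s : List Int) (hs : s.Pairwise (· ≤ ·)) {i j : Nat} (hij : i ≤ j)
    (hj : j < s.length) : s[i]'(by omega) ≤ s[j] := by
  rcases Nat.lt_or_ge i j with h | h
  · exact List.pairwise_iff_getElem.mp hs i j (by omega) hj h
  · have : i = j := by omega
    subst this
    exact le_refl _

-- a run s[n] = s[n+2] = x in a sorted list gives count x ≥ 3
theorem pv_triple_count (s : List Int) (hs : s.Pairwise (· ≤ ·)) (x : Int) (n : Nat)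
    (hn : n + 2 < s.length) (h1 : s[n]'(by omega) = x) (h3 : s[n + 2]'(by omega) = x) :
    3 ≤ List.count x s := by
  have h2 : s[n + 1]'(by omega) = x := by
    have ha : s[n]'(by omega) ≤ s[n + 1]'(by omega) := pv_sorted_mono s hs (by omega) (by omega)
    have hb : s[n + 1]'(by omega) ≤ s[n + 2]'(by omega) := pv_sorted_mono s hs (by omega) (by omega)
    rw [h1] at ha
    rw [h3] at hb
    exact le_antisymm hb ha
  have hd : s.drop n = x :: x :: x :: s.drop (n + 3) := by
    rw [List.drop_eq_getElem_cons (by omega), List.drop_eq_getElem_cons (by omega),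
      List.drop_eq_getElem_cons (by omega)]
    show s[n] :: s[n + 1]'(by omega) :: s[n + 2]'(by omega) :: List.drop (n + 3) s = _
    rw [h1, h2, h3]
  have hsplit : List.count x s = List.count x (s.take n) + List.count x (s.drop n) := by
    rw [← List.count_append, List.take_append_drop]
  rw [hd] at hsplit
  simp at hsplit
  omega

theorem pv_sorted_head_eq (l : List Int) (hs : l.Pairwise (· ≤ ·)) (x : Int) (hx : x ∈ l)
    (hle : ∀ y ∈ l, x ≤ y) : ∃ t, l = x :: t := by
  cases l with
  | nil => cases hx
  | cons a t =>
    rcases List.mem_cons.mp hx with rfl | hxt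
    · exact ⟨t, rfl⟩
    · have hax : a ≤ x := (List.pairwise_cons.mp hs).1 x hxt
      have hxa : x ≤ a := hle a List.mem_cons_self
      exact ⟨t, by rw [le_antisymm hax hxa]⟩

theorem pv_sorted_replicate (k : Nat) : ∀ (l : List Int), l.Pairwise (· ≤ ·) →
    ∀ x : Int, (∀ y ∈ l, x ≤ y) → k ≤ List.count x l → ∃ t, l = List.replicate k x ++ t := by
  induction k with
  | zero => exact fun l _ x _ _ => ⟨l, rfl⟩
  | succ k ih =>
    intro l hs x hle hc
    have hx : x ∈ l := List.count_pos_iff.mp (by omega)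
    obtain ⟨t, rfl⟩ := pv_sorted_head_eq l hs x hx hle
    have hs' := (List.pairwise_cons.mp hs).2
    have hle' : ∀ y ∈ t, x ≤ y := (List.pairwise_cons.mp hs).1
    have hct : k ≤ List.count x t := by
      rw [List.count_cons_self] at hc
      omega
    obtain ⟨t', rfl⟩ := ih t hs' x hle' hct
    exact ⟨t', by simp [List.replicate_succ]⟩

-- count x ≥ 3 in a sorted list gives a run s[n] = s[n+2] = x
theorem pv_count_triple (s : List Int) (hs : s.Pairwise (· ≤ ·)) (x : Int)
    (hc : 3 ≤ List.count x s) :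
    ∃ n : Nat, ∃ _ : n + 2 < s.length, s[n]'(by omega) = x ∧ s[n + 2]'(by omega) = x := by
  have hsd : s = s.takeWhile (fun y => decide (y < x)) ++ s.dropWhile (fun y => decide (y < x)) :=
    (List.takeWhile_append_dropWhile).symm
  set w := s.takeWhile (fun y => decide (y < x)) with hw
  set d := s.dropWhile (fun y => decide (y < x)) with hdd
  have hcw : List.count x w = 0 := by
    rw [List.count_eq_zero]
    intro hxw
    have := List.mem_takeWhile_imp hxw
    simp at this
  have hcd : 3 ≤ List.count x d := by
    rw [hsd, List.count_append] at hc
    omega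
  have hds : d.Pairwise (· ≤ ·) := List.Pairwise.sublist (List.dropWhile_sublist _) hs
  have hled : ∀ y ∈ d, x ≤ y := by
    cases hdc : d with
    | nil => simp
    | cons a t =>
      have hax : x ≤ a := by
        have hhead := List.head?_dropWhile_not (fun y => decide (y < x)) s
        rw [← hdd, hdc] at hhead
        simp at hhead
        omega
      intro y hy
      rcases List.mem_cons.mp hy with rfl | hyt
      · exact hax
      · have : a ≤ y := (List.pairwise_cons.mp (hdc ▸ hds)).1 y hyt
        omega
  obtain ⟨t, hdt⟩ := pv_sorted_replicate 3 d hds x hled hcd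
  have hswd : s = w ++ (x :: x :: x :: t) := by rw [hsd, hdt]; rfl
  have hlen : s.length = w.length + (3 + t.length) := by
    rw [hswd, List.length_append]
    simp
    omega
  refine ⟨w.length, by omega, ?_, ?_⟩
  · rw [List.getElem_of_eq hswd, List.getElem_append_right (le_refl _)]
    simp
  · rw [List.getElem_of_eq hswd, List.getElem_append_right (by omega)]
    simp

-- ===== VERDICT (by name: the statement is the Claim_ definition above) =====
theorem check_for_triples_spec : Claim_equal_check_for_triples := by
  intro rolls _
  show check_for_triples rolls = check_for_triples_alt rolls
  show pvScanItems ((rolls.foldl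
      (fun d roll => if d.contains roll = false then d.insert roll 1 else d.modify roll 0 (· + 1))
      PySem.Dict.empty).items) =
    pvScanSet (pvRunTriples (PySem.List.sorted rolls (fun x => x))) rolls
  rw [pvFold_eq_counter, PySem.Dict.items_counter, pvScanItems_map, pvGo_ofList, pvScanSet_eq_go]
  have hpq : (fun k => decide (3 ≤ (rolls.count k : Int))) =
      (fun k => PySem.Set.contains (pvRunTriples (PySem.List.sorted rolls (fun x => x))) k) := by
    funext k
    have hperm : (PySem.List.sorted rolls (fun x => x)).Perm rolls :=
      PySem.List.sorted_perm rolls (fun x => x) false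
    have hcnt : List.count k (PySem.List.sorted rolls (fun x => x)) = List.count k rolls :=
      hperm.count_eq k
    have hpair : (PySem.List.sorted rolls (fun x => x)).Pairwise (· ≤ ·) := by
      have := PySem.List.sorted_pairwise rolls (fun x => x)
      simpa using this
    rw [Bool.eq_iff_iff]
    simp only [decide_eq_true_eq, PySem.Set.contains_iff, mem_pvRunTriples]
    constructor
    · intro h
      exact pv_count_triple _ hpair k (by rw [hcnt]; exact_mod_cast h)
    · rintro ⟨n, hn, h1, h2⟩
      have := pv_triple_count _ hpair k n hn h1 h2
      rw [hcnt] at this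
      exact_mod_cast this
  rw [hpq]
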